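-- pv_equiv track=rewrite | github.com/yaojiezheng1-droid/amazon_order | order_generation/excel_to_json.py | guess_key
-- ===== SOURCE A (Python) =====
-- from typing import Dict, Tuple, Any, List
--
-- YELLOW = 'FFFFFF00'
--
-- def guess_key(address: str, cells: Dict[str, Tuple[str, str, str]]) -> str:
--     """Return a label for the given cell address.
--
--     The label is taken from the nearest non-yellow cell either to the left
--     on the same row or above in the same column.  If no such cell exists the
--     returned key is an empty string.
--     """
--     # separate column letters and row number
--     col = ''.join(ch for ch in address if ch.isalpha())
--     row = int(''.join(ch for ch in address if ch.isdigit()))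
--
--     # look left
--     if len(col) == 1 and col > 'A':
--         left_col = chr(ord(col) - 1)
--         left_addr = f'{left_col}{row}'
--         left = cells.get(left_addr)
--         if left and left[1] != YELLOW and left[0]:
--             return str(left[0])
--
--     # look upward
--     r = row - 1
--     while r > 0:
--         up_addr = f'{col}{r}'
--         cell = cells.get(up_addr)
--         if cell:
--             if cell[1] != YELLOW and cell[0]:
--                 return str(cell[0])
--         r -= 1
--     return ''
-- ===== SOURCE B (Python) =====
-- YELLOW = 'FFFFFF00'
--
--
-- def _suffix_row(suffix):
--     """Row number encoded by a key suffix, or None.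
--
--     Only a non-empty all-digit suffix without a leading zero can be the row
--     part that str() would produce for a positive row number."""
--     if not suffix or not suffix.isdigit() or suffix[0] == '0':
--         return None
--     value = 0
--     for ch in suffix:
--         value = value * 10 + (ord(ch) - 48)
--     return value
--
--
-- def guess_key(address, cells):
--     """Return a label for the given cell address (sparse single pass upward)."""
--     col = ''.join(ch for ch in address if ch.isalpha())
--     row = int(''.join(ch for ch in address if ch.isdigit()))
--
--     # look left (unchanged)
--     if len(col) == 1 and col > 'A':
--         left = cells.get(chr(ord(col) - 1) + str(row))
--         if left and left[1] != YELLOW and left[0]: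
--             return str(left[0])
--
--     # look upward: one pass over the existing cells instead of counting rows down
--     best = 0
--     label = ''
--     for key, cell in cells.items():
--         if key.startswith(col):
--             r = _suffix_row(key[len(col):])
--             if r is not None and best < r < row and cell[1] != YELLOW and cell[0]:
--                 best = r
--                 label = str(cell[0])
--     return label
-- ===== Notes on version B (the rewrite author's own statement) =====
-- stated objective: faster
-- what changed: The upward search no longer counts row indices down from row-1 doing a dict lookup per index; instead B makes one pass over the existing cells, parses each key's row suffix for the same column, and keeps the qualifying non-yellow labelled cell with the largest row below the target.
-- outside the precondition, e.g. on guess_key('AB', {}): A raises ValueError, B raises ValueError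
import Mathlib
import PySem

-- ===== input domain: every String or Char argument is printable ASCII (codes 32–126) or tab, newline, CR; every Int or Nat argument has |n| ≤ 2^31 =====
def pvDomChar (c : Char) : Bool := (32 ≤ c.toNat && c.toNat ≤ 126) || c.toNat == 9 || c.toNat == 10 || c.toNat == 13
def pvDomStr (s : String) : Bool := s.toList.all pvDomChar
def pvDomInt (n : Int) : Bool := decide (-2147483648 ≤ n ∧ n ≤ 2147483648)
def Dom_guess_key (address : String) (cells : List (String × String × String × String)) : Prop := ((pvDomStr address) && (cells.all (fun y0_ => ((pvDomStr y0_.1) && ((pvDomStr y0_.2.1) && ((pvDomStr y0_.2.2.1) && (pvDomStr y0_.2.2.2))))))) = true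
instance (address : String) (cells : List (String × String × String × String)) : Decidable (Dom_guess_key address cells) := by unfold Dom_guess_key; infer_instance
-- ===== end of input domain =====

-- B replaces A's dense count-down over row indices by ONE pass over the existing
-- cells (max qualifying parsed row wins); the left-lookup block is unchanged.

-- ===== PORT A =====
def pvYellow : String := "FFFFFF00"

-- cells.get(k): first-match lookup in the association list (Python dict lookup)
def pvGet (cells : List (String × String × String × String)) (k : String) :
    Option (String × String × String) :=
  (PySem.Dict.mk cells).get? k

-- ''.join(ch for ch in address if ch.isalpha())
def pvCol (address : String) : List Char := address.toList.filter PySem.Chars.isalpha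

-- int(''.join(ch for ch in address if ch.isdigit())) — none = ValueError
def pvRow? (address : String) : Option Int :=
  PySem.Int.ofChars? (address.toList.filter PySem.Chars.isdigit)

-- the "look left" block, shared verbatim by A and B (Source B keeps it unchanged)
def pvLeft (cells : List (String × String × String × String)) (col : List Char)
    (row : Int) : Option String :=
  match col with
  | [c] =>
      if 'A' < c then
        match pvGet cells (String.ofList (Char.ofNat (c.toNat - 1) :: PySem.Int.toChars row)) with
        | some (v0, v1, _) => if v1 ≠ pvYellow ∧ v0 ≠ "" then some v0 else none
        | none => none
      else none
  | _ => none

-- A's upward while-loop, r counting down; fuel n is the current r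
def guessUpA (cells : List (String × String × String × String)) (col : List Char) :
    Nat → String
  | 0 => ""
  | n + 1 =>
      match pvGet cells (String.ofList (col ++ PySem.Int.toChars ((n : Int) + 1))) with
      | some (v0, v1, _) =>
          if v1 ≠ pvYellow ∧ v0 ≠ "" then v0 else guessUpA cells col n
      | none => guessUpA cells col n

def guess_key (address : String) (cells : List (String × String × String × String)) : String :=
  let col := pvCol address
  match pvRow? address with
  | none => ""   -- Python raises ValueError here; excluded by Pre_guess_key
  | some row =>
    match pvLeft cells col row with
    | some s => s
    | none => guessUpA cells col (row - 1).toNat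

-- ===== PORT B =====
-- _suffix_row(suffix) of Source B
def pvSuffixRow (suf : List Char) : Option Int :=
  if suf = [] ∨ ¬ (suf.all PySem.Chars.isdigit = true) ∨ suf.head? = some '0' then none
  else some (suf.foldl (fun v c => v * 10 + ((c.toNat : Int) - 48)) 0)

-- body of Source B's single for-loop over cells.items()
def pvStep (col : List Char) (row : Int) (acc : Int × String)
    (kv : String × String × String × String) : Int × String :=
  if PySem.Chars.startswith kv.1.toList col then
    match pvSuffixRow (kv.1.toList.drop col.length) with
    | some r =>
        if acc.1 < r ∧ r < row ∧ kv.2.2.1 ≠ pvYellow ∧ kv.2.1 ≠ "" then (r, kv.2.1)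
        else acc
    | none => acc
  else acc

def guess_key_alt (address : String) (cells : List (String × String × String × String)) : String :=
  let col := pvCol address
  match pvRow? address with
  | none => ""   -- same int('') ValueError in Source B; excluded by Pre_guess_key
  | some row =>
    match pvLeft cells col row with
    | some s => s
    | none => (cells.foldl (pvStep col row) ((0 : Int), "")).2

-- ===== PRECONDITION & SPEC =====
-- Pre_ excludes (a) addresses without a digit, on which A raises ValueError at int(''),
-- and (b) association lists with duplicate keys, which cannot arise from the Python
-- dict argument and whose first-match behaviour is an artefact of the list encoding.
def Pre_guess_key (address : String) (cells : List (String × String × String × String)) : Prop :=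
  (address.toList.any PySem.Chars.isdigit = true) ∧ (cells.map Prod.fst).Nodup
instance (address : String) (cells : List (String × String × String × String)) : Decidable (Pre_guess_key address cells) := by unfold Pre_guess_key; infer_instance

def pvWitness_guess_key : String × (List (String × String × String × String)) :=
  ("B2", [("B1", ("key1", "", "")), ("A2", ("lab", "FFFFFF00", ""))])

def Spec_guess_key (address : String) (cells : List (String × String × String × String)) (out : String) : Prop := out = guess_key_alt address cells
instance (address : String) (cells : List (String × String × String × String)) (out : String) : Decidable (Spec_guess_key address cells out) := by unfold Spec_guess_key; infer_instance

-- ===== CLAIM (what is proved, stated in full; the proofs are below) =====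
def Claim_equal_guess_key : Prop := ∀ (address : String) (cells : List (String × String × String × String)), Dom_guess_key address cells → Pre_guess_key address cells → Spec_guess_key address cells (guess_key address cells)

-- ===== LEMMAS AND PROOFS =====

-- value of a digit string (the loop of Source B's _suffix_row, on Nat)
def pvVal (cs : List Char) : Nat := cs.foldl (fun a c => 10 * a + (c.toNat - 48)) 0

-- well-formed row suffix: non-empty, all digits, no leading zero
def pvWF (cs : List Char) : Prop :=
  cs ≠ [] ∧ cs.all PySem.Chars.isdigit = true ∧ cs.head? ≠ some '0'

-- the qualifying label A's upward loop sees at row r (if any)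
def pvAq (cells : List (String × String × String × String)) (col : List Char)
    (r : Nat) : Option String :=
  match pvGet cells (String.ofList (col ++ Nat.toDigits 10 r)) with
  | some (v0, v1, _) => if v1 ≠ pvYellow ∧ v0 ≠ "" then some v0 else none
  | none => none

-- "s is the label of the largest qualifying row in [1, n], or '' if none"
def pvIsBest (cells : List (String × String × String × String)) (col : List Char)
    (n : Nat) (s : String) : Prop :=
  (s = "" ∧ ∀ r, 1 ≤ r → r ≤ n → pvAq cells col r = none) ∨
  (∃ r, 1 ≤ r ∧ r ≤ n ∧ pvAq cells col r = some s ∧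
    ∀ r', r < r' → r' ≤ n → pvAq cells col r' = none)

-- candidate extracted from one cells entry (pvStep without the accumulator test)
def pvCand (col : List Char) (row : Int) (kv : String × String × String × String) :
    Option (Int × String) :=
  if PySem.Chars.startswith kv.1.toList col then
    match pvSuffixRow (kv.1.toList.drop col.length) with
    | some r =>
        if r < row ∧ kv.2.2.1 ≠ pvYellow ∧ kv.2.1 ≠ "" then some (r, kv.2.1) else none
    | none => none
  else none

theorem pv_isdigit_iff (c : Char) :
    PySem.Chars.isdigit c = true ↔ (48 ≤ c.toNat ∧ c.toNat ≤ 57) := by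
  simp only [PySem.Chars.isdigit, Bool.and_eq_true, decide_eq_true_eq, Char.le_def]
  constructor <;> intro h <;> exact ⟨h.1, h.2⟩

theorem pv_digitChar_eq (c : Char) (h : PySem.Chars.isdigit c = true) :
    Nat.digitChar (c.toNat - 48) = c := by
  rw [pv_isdigit_iff] at h
  obtain ⟨h1, h2⟩ := h
  have hc : Char.ofNat c.toNat = c := Char.ofNat_toNat c
  interval_cases hk : (c.toNat : Nat) <;> · rw [← hc]; decide

theorem pv_toChars_natCast (r : Nat) :
    PySem.Int.toChars (r : Int) = Nat.toDigits 10 r := by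
  simp [PySem.Int.toChars]

theorem pvVal_go (cs : List Char) (a : Nat) :
    cs.foldl (fun a c => 10 * a + (c.toNat - 48)) a =
      a * 10 ^ cs.length + pvVal cs := by
  induction cs generalizing a with
  | nil => simp [pvVal]
  | cons c cs ih =>
      simp only [List.foldl_cons, pvVal, List.length_cons]
      rw [ih, ih (10 * 0 + (c.toNat - 48))]
      ring

theorem pvVal_append_singleton (xs : List Char) (c : Char) :
    pvVal (xs ++ [c]) = 10 * pvVal xs + (c.toNat - 48) := by
  simp [pvVal, List.foldl_append]

theorem pv_digitChar_toNat (n : Nat) (h : n < 10) :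
    (Nat.digitChar n).toNat = n + 48 := by
  interval_cases n <;> decide

theorem pv_val_toDigits (n : Nat) : pvVal (Nat.toDigits 10 n) = n := by
  induction n using Nat.strong_induction_on with
  | _ n ih =>
    rw [Nat.toDigits_eq_if (by norm_num)]
    split
    · next h => simp [pvVal, pv_digitChar_toNat n h]
    · next h =>
      rw [pvVal_append_singleton, ih (n / 10) (by omega),
        pv_digitChar_toNat _ (Nat.mod_lt _ (by norm_num))]
      omega

theorem pv_isdigit_of_isDigit (c : Char) (h : c.isDigit = true) :
    PySem.Chars.isdigit c = true := by
  rw [pv_isdigit_iff]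
  simp [Char.isDigit] at h
  exact ⟨h.1, h.2⟩

theorem pv_toDigits_ne_nil (n : Nat) : Nat.toDigits 10 n ≠ [] :=
  List.ne_nil_of_length_pos Nat.length_toDigits_pos

theorem pv_toDigits_digits (n : Nat) :
    (Nat.toDigits 10 n).all PySem.Chars.isdigit = true := by
  rw [List.all_eq_true]
  intro c hc
  exact pv_isdigit_of_isDigit c (Nat.isDigit_of_mem_toDigits (by norm_num) (by norm_num) hc)

theorem pv_toDigits_head (n : Nat) (h : 1 ≤ n) :
    (Nat.toDigits 10 n).head? ≠ some '0' := by
  induction n using Nat.strong_induction_on with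
  | _ n ih =>
    rw [Nat.toDigits_eq_if (by norm_num)]
    split
    · next hlt =>
      simp only [List.head?_cons]
      intro he
      have : Nat.digitChar n = '0' := by simpa using he
      interval_cases n <;> simp_all <;> exact absurd this (by decide)
    · next hge =>
      rw [List.head?_append_of_ne_nil _ (pv_toDigits_ne_nil _)]
      exact ih (n / 10) (by omega) (by omega)

theorem pv_wf_toDigits (n : Nat) (h : 1 ≤ n) : pvWF (Nat.toDigits 10 n) :=
  ⟨pv_toDigits_ne_nil n, pv_toDigits_digits n, pv_toDigits_head n h⟩

theorem pv_val_pos (cs : List Char) (h : pvWF cs) : 1 ≤ pvVal cs := by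
  obtain ⟨hne, hdig, hhd⟩ := h
  cases cs with
  | nil => exact absurd rfl hne
  | cons c rest =>
    have hcdig : PySem.Chars.isdigit c = true := by
      simp [List.all_eq_true] at hdig; exact hdig.1
    rw [pv_isdigit_iff] at hcdig
    have hc0 : c ≠ '0' := by intro hc; rw [hc] at hhd; exact hhd rfl
    have h49 : 49 ≤ c.toNat := by
      rcases Nat.lt_or_ge c.toNat 49 with hlt | hge
      · exfalso
        have h48 : c.toNat = 48 := by omega
        have hofn : Char.ofNat c.toNat = Char.ofNat 48 := by rw [h48]
        rw [Char.ofNat_toNat] at hofn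
        exact hc0 (by rw [hofn])
      · exact hge
    have hval : pvVal (c :: rest) = (c.toNat - 48) * 10 ^ rest.length + pvVal rest := by
      simp only [pvVal, List.foldl_cons]
      rw [show (10 * 0 + (c.toNat - 48)) = c.toNat - 48 by omega]
      exact pvVal_go rest (c.toNat - 48)
    rw [hval]
    have hp : 1 ≤ 10 ^ rest.length := Nat.one_le_pow _ _ (by norm_num)
    have := Nat.mul_le_mul (show 1 ≤ c.toNat - 48 by omega) hp
    omega

theorem pv_toDigits_val (cs : List Char) (h : pvWF cs) :
    Nat.toDigits 10 (pvVal cs) = cs := by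
  induction cs using List.reverseRecOn with
  | nil => exact absurd rfl h.1
  | append_singleton ds c ih =>
    obtain ⟨hne, hdig, hhd⟩ := h
    have hcdig : PySem.Chars.isdigit c = true := by
      rw [List.all_eq_true] at hdig
      exact hdig c (by simp)
    have hc10 : c.toNat - 48 < 10 := by rw [pv_isdigit_iff] at hcdig; omega
    cases ds with
    | nil =>
      simp only [List.nil_append, pvVal, List.foldl_cons, List.foldl_nil]
      rw [show (10 * 0 + (c.toNat - 48)) = c.toNat - 48 by omega]
      rw [Nat.toDigits_of_lt_base hc10, pv_digitChar_eq c hcdig]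
    | cons d ds' =>
      have hwfds : pvWF (d :: ds') := by
        refine ⟨by simp, ?_, ?_⟩
        · rw [List.all_eq_true] at hdig ⊢
          exact fun x hx => hdig x (List.mem_append_left _ hx)
        · simpa using hhd
      rw [pvVal_append_singleton]
      rw [← Nat.toDigits_append_toDigits (by norm_num) (pv_val_pos _ hwfds) hc10]
      rw [ih hwfds, Nat.toDigits_of_lt_base hc10, pv_digitChar_eq c hcdig]

theorem pv_foldl_int_eq (suf : List Char) (hd : suf.all PySem.Chars.isdigit = true) :
    ∀ a : Nat, suf.foldl (fun v c => v * 10 + ((c.toNat : Int) - 48)) (a : Int) =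
      ((suf.foldl (fun a c => 10 * a + (c.toNat - 48)) a : Nat) : Int) := by
  induction suf with
  | nil => intro a; simp
  | cons c rest ih =>
    intro a
    rw [List.all_cons, Bool.and_eq_true] at hd
    have h48 : 48 ≤ c.toNat := ((pv_isdigit_iff c).1 hd.1).1
    simp only [List.foldl_cons]
    rw [show ((a : Int) * 10 + ((c.toNat : Int) - 48)) = ((10 * a + (c.toNat - 48) : Nat) : Int) by
      push_cast [h48]; ring]
    exact ih hd.2 _

theorem pv_suffixRow_eq_some (suf : List Char) (r : Int) :
    pvSuffixRow suf = some r ↔ pvWF suf ∧ r = ((pvVal suf : Nat) : Int) := by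
  unfold pvSuffixRow
  split
  · next h =>
    simp only [reduceCtorEq, false_iff]
    rintro ⟨⟨h1, h2, h3⟩, -⟩
    rcases h with h | h | h
    · exact h1 h
    · exact h h2
    · exact h3 h
  · next h =>
    push Not at h
    obtain ⟨h1, h2, h3⟩ := h
    have := pv_foldl_int_eq suf h2 0
    simp only [Nat.cast_zero] at this
    rw [this]
    simp only [Option.some_inj]
    constructor
    · intro hr; exact ⟨⟨h1, h2, h3⟩, hr.symm⟩
    · rintro ⟨-, hr⟩; exact hr.symm

theorem pv_step_eq (col : List Char) (row : Int) (acc : Int × String)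
    (kv : String × String × String × String) :
    pvStep col row acc kv =
      match pvCand col row kv with
      | some (r, v) => if acc.1 < r then (r, v) else acc
      | none => acc := by
  unfold pvStep pvCand
  cases hsw : PySem.Chars.startswith kv.1.toList col
  · simp
  · simp only [if_true]
    cases hr : pvSuffixRow (kv.1.toList.drop col.length) with
    | none => simp
    | some r =>
      by_cases hq : r < row ∧ kv.2.2.1 ≠ pvYellow ∧ kv.2.1 ≠ ""
      · by_cases ha : acc.1 < r
        · simp [hq.1, hq.2.1, hq.2.2, ha]
        · simp [hq.1, hq.2.1, hq.2.2, ha]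
      · have : ¬ (acc.1 < r ∧ r < row ∧ kv.2.2.1 ≠ pvYellow ∧ kv.2.1 ≠ "") := by tauto
        simp only []
        rw [if_neg this, if_neg hq]

theorem pv_guessUpA_succ (cells : List (String × String × String × String))
    (col : List Char) (n : Nat) :
    guessUpA cells col (n + 1) =
      match pvAq cells col (n + 1) with
      | some v => v
      | none => guessUpA cells col n := by
  show (match pvGet cells (String.ofList (col ++ PySem.Int.toChars ((n : Int) + 1))) with
      | some (v0, v1, _) =>
          if v1 ≠ pvYellow ∧ v0 ≠ "" then v0 else guessUpA cells col n
      | none => guessUpA cells col n) = _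
  have hcast : ((n : Int) + 1) = ((n + 1 : Nat) : Int) := by push_cast; ring
  rw [hcast, pv_toChars_natCast]
  unfold pvAq
  cases pvGet cells (String.ofList (col ++ Nat.toDigits 10 (n + 1))) with
  | none => rfl
  | some v =>
    obtain ⟨v0, v1, v2⟩ := v
    by_cases h : v1 ≠ pvYellow ∧ v0 ≠ "" <;> simp [h]

theorem pv_A_best (cells : List (String × String × String × String)) (col : List Char)
    (n : Nat) : pvIsBest cells col n (guessUpA cells col n) := by
  induction n with
  | zero => exact Or.inl ⟨rfl, fun r h1 h2 => by omega⟩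
  | succ n ih =>
    rw [pv_guessUpA_succ]
    cases hq : pvAq cells col (n + 1) with
    | some v =>
      exact Or.inr ⟨n + 1, by omega, le_refl _, hq, fun r' h1 h2 => by omega⟩
    | none =>
      rcases ih with ⟨hs, hall⟩ | ⟨r, hr1, hr2, hr3, hr4⟩
      · refine Or.inl ⟨hs, fun r h1 h2 => ?_⟩
        rcases Nat.lt_or_ge r (n + 1) with h | h
        · exact hall r h1 (by omega)
        · rw [show r = n + 1 by omega]; exact hq
      · refine Or.inr ⟨r, hr1, by omega, hr3, fun r' h1 h2 => ?_⟩
        rcases Nat.lt_or_ge r' (n + 1) with h | h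
        · exact hr4 r' h1 (by omega)
        · rw [show r' = n + 1 by omega]; exact hq

theorem pv_foldMax (col : List Char) (row : Int)
    (l : List (String × String × String × String)) (acc : Int × String) :
    (l.foldl (pvStep col row) acc = acc ∧
      ∀ kv ∈ l, ∀ r v, pvCand col row kv = some (r, v) → r ≤ acc.1) ∨
    (∃ kv ∈ l, ∃ r v, pvCand col row kv = some (r, v) ∧
      l.foldl (pvStep col row) acc = (r, v) ∧ acc.1 < r ∧
      ∀ kv' ∈ l, ∀ r' v', pvCand col row kv' = some (r', v') → r' ≤ r) := by
  induction l generalizing acc with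
  | nil => exact Or.inl ⟨rfl, fun kv h => absurd h (List.not_mem_nil)⟩
  | cons kv rest ih =>
    rw [List.foldl_cons]
    cases hc : pvCand col row kv with
    | none =>
      have hstep : pvStep col row acc kv = acc := by rw [pv_step_eq, hc]
      rw [hstep]
      rcases ih acc with ⟨heq, hb⟩ | ⟨kv', hm', r', v', hc', heq', hlt', hb'⟩
      · refine Or.inl ⟨heq, fun kv0 hm0 r v hc0 => ?_⟩
        rcases List.mem_cons.1 hm0 with h | h
        · rw [h, hc] at hc0; exact absurd hc0 (by simp)
        · exact hb kv0 h r v hc0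
      · refine Or.inr ⟨kv', List.mem_cons_of_mem _ hm', r', v', hc', heq', hlt',
          fun kv0 hm0 r0 v0 hc0 => ?_⟩
        rcases List.mem_cons.1 hm0 with h | h
        · rw [h, hc] at hc0; exact absurd hc0 (by simp)
        · exact hb' kv0 h r0 v0 hc0
    | some p =>
      obtain ⟨r, v⟩ := p
      by_cases hlt : acc.1 < r
      · have hstep : pvStep col row acc kv = (r, v) := by
          rw [pv_step_eq, hc]; simp [hlt]
        rw [hstep]
        rcases ih (r, v) with ⟨heq, hb⟩ | ⟨kv', hm', r', v', hc', heq', hlt', hb'⟩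
        · refine Or.inr ⟨kv, List.mem_cons_self, r, v, hc, heq, hlt,
            fun kv0 hm0 r0 v0 hc0 => ?_⟩
          rcases List.mem_cons.1 hm0 with h | h
          · rw [h, hc] at hc0
            simp at hc0
            exact le_of_eq hc0.1.symm
          · exact hb kv0 h r0 v0 hc0
        · refine Or.inr ⟨kv', List.mem_cons_of_mem _ hm', r', v', hc', heq',
            lt_trans hlt hlt', fun kv0 hm0 r0 v0 hc0 => ?_⟩
          rcases List.mem_cons.1 hm0 with h | h
          · rw [h, hc] at hc0
            simp at hc0
            rw [← hc0.1]
            omega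
          · exact hb' kv0 h r0 v0 hc0
      · have hstep : pvStep col row acc kv = acc := by
          rw [pv_step_eq, hc]; simp [hlt]
        rw [hstep]
        rcases ih acc with ⟨heq, hb⟩ | ⟨kv', hm', r', v', hc', heq', hlt', hb'⟩
        · refine Or.inl ⟨heq, fun kv0 hm0 r0 v0 hc0 => ?_⟩
          rcases List.mem_cons.1 hm0 with h | h
          · rw [h, hc] at hc0
            simp at hc0
            rw [← hc0.1]
            omega
          · exact hb kv0 h r0 v0 hc0
        · refine Or.inr ⟨kv', List.mem_cons_of_mem _ hm', r', v', hc', heq', hlt',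
            fun kv0 hm0 r0 v0 hc0 => ?_⟩
          rcases List.mem_cons.1 hm0 with h | h
          · rw [h, hc] at hc0
            simp at hc0
            rw [← hc0.1]
            omega
          · exact hb' kv0 h r0 v0 hc0

theorem pv_cand_of_Aq (cells : List (String × String × String × String))
    (col : List Char) (row : Int) (r : Nat) (v : String)
    (h1 : 1 ≤ r) (hr : (r : Int) < row) (hq : pvAq cells col r = some v) :
    ∃ kv ∈ cells, pvCand col row kv = some ((r : Int), v) := by
  unfold pvAq at hq
  cases hg : pvGet cells (String.ofList (col ++ Nat.toDigits 10 r)) with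
  | none => rw [hg] at hq; exact absurd hq (by simp)
  | some p =>
    obtain ⟨v0, v1, v2⟩ := p
    rw [hg] at hq
    change (if v1 ≠ pvYellow ∧ v0 ≠ "" then some v0 else none) = some v at hq
    by_cases hcond : v1 ≠ pvYellow ∧ v0 ≠ ""
    · rw [if_pos hcond] at hq
      have hv : v0 = v := Option.some_inj.1 hq
      subst hv
      refine ⟨(String.ofList (col ++ Nat.toDigits 10 r), v0, v1, v2), ?_, ?_⟩
      · have := PySem.Dict.mem_items_of_get?_eq_some (PySem.Dict.mk cells) hg
        exact this
      · have hsw : PySem.Chars.startswith (col ++ Nat.toDigits 10 r) col = true :=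
          (PySem.Chars.startswith_iff _ _).2 (List.prefix_append _ _)
        have hsr : pvSuffixRow (Nat.toDigits 10 r) = some ((r : Nat) : Int) := by
          rw [pv_suffixRow_eq_some]
          exact ⟨pv_wf_toDigits r h1, by rw [pv_val_toDigits]⟩
        unfold pvCand
        rw [String.toList_ofList, List.drop_left, hsw, hsr]
        simp [hr, hcond.1, hcond.2]
    · rw [if_neg hcond] at hq
      exact absurd hq (by simp)

theorem pv_Aq_of_cand (cells : List (String × String × String × String))
    (col : List Char) (row : Int) (hnd : (cells.map Prod.fst).Nodup)
    (kv : String × String × String × String) (hm : kv ∈ cells) (r : Int) (v : String)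
    (hc : pvCand col row kv = some (r, v)) :
    ∃ rn : Nat, (rn : Int) = r ∧ 1 ≤ rn ∧ r < row ∧ pvAq cells col rn = some v := by
  unfold pvCand at hc
  cases hsw : PySem.Chars.startswith kv.1.toList col with
  | false => rw [hsw] at hc; exact absurd hc (by simp)
  | true =>
    rw [hsw] at hc
    rw [if_pos rfl] at hc
    cases hsr : pvSuffixRow (kv.1.toList.drop col.length) with
    | none => rw [hsr] at hc; exact absurd hc (by simp)
    | some r0 =>
      rw [hsr] at hc
      change (if r0 < row ∧ kv.2.2.1 ≠ pvYellow ∧ kv.2.1 ≠ "" then some (r0, kv.2.1)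
        else none) = some (r, v) at hc
      obtain ⟨hwf, hr0⟩ := (pv_suffixRow_eq_some _ _).1 hsr
      by_cases hcond : r0 < row ∧ kv.2.2.1 ≠ pvYellow ∧ kv.2.1 ≠ ""
      · rw [if_pos hcond] at hc
        rw [Option.some_inj, Prod.mk.injEq] at hc
        obtain ⟨hcr, hcv⟩ := hc
        refine ⟨pvVal (kv.1.toList.drop col.length), by rw [← hcr, hr0], pv_val_pos _ hwf,
          by rw [← hcr]; exact hcond.1, ?_⟩
        have hkey : col ++ Nat.toDigits 10 (pvVal (kv.1.toList.drop col.length)) = kv.1.toList := by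
          rw [pv_toDigits_val _ hwf]
          exact List.prefix_iff_eq_append.1 ((PySem.Chars.startswith_iff _ _).1 hsw)
        unfold pvAq
        rw [hkey, String.ofList_toList]
        have hitems : (PySem.Dict.mk cells).items = cells := rfl
        have hkeys : (PySem.Dict.mk cells).keys.Nodup := by
          rw [PySem.Dict.keys_mk]
          exact hnd
        have hget : pvGet cells kv.1 = some kv.2 := by
          unfold pvGet
          exact PySem.Dict.get?_of_mem_items (PySem.Dict.mk cells)
            (by rw [hitems]; simpa using hm) hkeys
        rw [hget]
        change (if kv.2.2.1 ≠ pvYellow ∧ kv.2.1 ≠ "" then some kv.2.1 else none) = some v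
        rw [if_pos ⟨hcond.2.1, hcond.2.2⟩, hcv]
      · rw [if_neg hcond] at hc
        exact absurd hc (by simp)

theorem pv_B_best (cells : List (String × String × String × String)) (col : List Char)
    (row : Int) (hnd : (cells.map Prod.fst).Nodup) :
    pvIsBest cells col (row - 1).toNat ((cells.foldl (pvStep col row) ((0 : Int), "")).2) := by
  rcases pv_foldMax col row cells ((0 : Int), "") with ⟨heq, hb⟩ | ⟨kv, hm, r, v, hc, heq, hlt, hb⟩
  · rw [heq]
    refine Or.inl ⟨rfl, fun r h1 h2 => ?_⟩
    by_contra hne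
    cases hq : pvAq cells col r with
    | none => exact hne hq
    | some v =>
      have hrrow : (r : Int) < row := by omega
      obtain ⟨kv, hm, hc⟩ := pv_cand_of_Aq cells col row r v h1 hrrow hq
      have := hb kv hm _ _ hc
      simp at this
      omega
  · rw [heq]
    obtain ⟨rn, hrn, hrn1, hrrow, hq⟩ := pv_Aq_of_cand cells col row hnd kv hm r v hc
    refine Or.inr ⟨rn, hrn1, by omega, hq, fun r' hgt hle => ?_⟩
    by_contra hne
    cases hq' : pvAq cells col r' with
    | none => exact hne hq'
    | some v' =>
      have hr'row : (r' : Int) < row := by omega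
      obtain ⟨kv', hm', hc'⟩ := pv_cand_of_Aq cells col row r' v' (by omega) hr'row hq'
      have := hb kv' hm' _ _ hc'
      omega

theorem pv_isBest_unique (cells : List (String × String × String × String))
    (col : List Char) (n : Nat) (s t : String)
    (hs : pvIsBest cells col n s) (ht : pvIsBest cells col n t) : s = t := by
  rcases hs with ⟨hs1, hs2⟩ | ⟨r, hr1, hr2, hr3, hr4⟩
  · rcases ht with ⟨ht1, -⟩ | ⟨r, hr1, hr2, hr3, -⟩
    · rw [hs1, ht1]
    · rw [hs2 r hr1 hr2] at hr3; exact absurd hr3 (by simp)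
  · rcases ht with ⟨-, ht2⟩ | ⟨r', hq1, hq2, hq3, hq4⟩
    · rw [ht2 r hr1 hr2] at hr3; exact absurd hr3 (by simp)
    · rcases Nat.lt_trichotomy r r' with h | h | h
      · rw [hr4 r' h hq2] at hq3; exact absurd hq3 (by simp)
      · subst h; rw [hr3] at hq3; exact Option.some_inj.1 hq3
      · rw [hq4 r h hr2] at hr3; exact absurd hr3 (by simp)

-- ===== VERDICT (by name: the statement is the Claim_ definition above) =====
theorem guess_key_spec : Claim_equal_guess_key := by
  intro address cells _ hpre
  unfold Spec_guess_key guess_key guess_key_alt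
  cases hrow : pvRow? address with
  | none => rfl
  | some row =>
    show (match pvLeft cells (pvCol address) row with
        | some s => s
        | none => guessUpA cells (pvCol address) (row - 1).toNat) =
      (match pvLeft cells (pvCol address) row with
        | some s => s
        | none => (cells.foldl (pvStep (pvCol address) row) ((0 : Int), "")).2)
    cases hleft : pvLeft cells (pvCol address) row with
    | some s => rfl
    | none =>
      show guessUpA cells (pvCol address) (row - 1).toNat =
        (cells.foldl (pvStep (pvCol address) row) ((0 : Int), "")).2
      exact pv_isBest_unique cells (pvCol address) (row - 1).toNat _ _
        (pv_A_best cells (pvCol address) (row - 1).toNat)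
        (pv_B_best cells (pvCol address) row hpre.2)
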